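-- pv_equiv track=rewrite | github.com/salmedina/InMind_Email | Server/extractor.py | findFwdEnd
-- ===== SOURCE A (Python) =====
-- def findFwdEnd(line,text,lineno):
-- 	i = lineno + 1
-- 	from_index = 0
-- 	while i < len(text) and (not "-- Forwarded by" in text[i]):
-- 		if "Subject:" in text[i]:
-- 			return i
-- 		if "From:" in text[i]:
-- 			from_index = i
-- 		i += 1
--
-- 	if from_index!=0:
-- 		return from_index
-- 	else:
-- 		return lineno + 1
-- ===== SOURCE B (Python) =====
-- def findFwdEnd(line, text, lineno):
--     # Phase 1: find the exclusive end of the scanned block (the first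
--     # "-- Forwarded by" line at or after lineno+1, or len(text)).
--     end = lineno + 1
--     while end < len(text) and "-- Forwarded by" not in text[end]:
--         end += 1
--     # Phase 2: first line containing "Subject:" wins.
--     for i in range(lineno + 1, end):
--         if "Subject:" in text[i]:
--             return i
--     # Phase 3: otherwise the last line containing "From:" (0 is A's sentinel).
--     from_index = 0
--     for i in range(lineno + 1, end):
--         if "From:" in text[i]:
--             from_index = i
--     return from_index if from_index != 0 else lineno + 1
-- ===== Notes on version B (the rewrite author's own statement) =====
-- stated objective: alternative
-- what changed: Replaces A's single fused while-loop with early return and carried state by three separate phases: first compute the block boundary, then a pure first-match scan for 'Subject:', then a pure last-match scan for 'From:'.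
import Mathlib
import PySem

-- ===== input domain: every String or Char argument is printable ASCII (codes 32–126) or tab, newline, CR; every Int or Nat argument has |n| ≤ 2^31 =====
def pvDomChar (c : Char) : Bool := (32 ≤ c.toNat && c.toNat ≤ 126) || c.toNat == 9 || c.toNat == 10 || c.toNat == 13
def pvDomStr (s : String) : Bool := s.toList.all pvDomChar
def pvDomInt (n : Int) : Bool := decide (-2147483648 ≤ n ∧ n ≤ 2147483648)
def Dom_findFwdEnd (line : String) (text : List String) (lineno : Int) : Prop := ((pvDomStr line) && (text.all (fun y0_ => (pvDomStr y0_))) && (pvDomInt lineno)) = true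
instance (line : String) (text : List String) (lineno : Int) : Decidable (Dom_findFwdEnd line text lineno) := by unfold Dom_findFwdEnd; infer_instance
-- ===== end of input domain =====

-- B replaces A's fused while-loop (early return + carried state) by three separate
-- phases: boundary scan, first-'Subject:' scan, last-'From:' scan; objective: alternative.


-- ===== PORT A =====
-- A's while-loop: i counts up, early return on "Subject:", from_index carries the last "From:".
def fwdLoopA (text : List String) (i : Int) (fromIdx : Int) (lineno : Int) : Int :=
  if _h : i < (text.length : Int) then
    match PySem.List.pyGet? text i with
    | none => 0   -- Python raises IndexError here; excluded by Pre_
    | some s =>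
      if PySem.Str.isIn "-- Forwarded by" s then
        (if fromIdx ≠ 0 then fromIdx else lineno + 1)
      else if PySem.Str.isIn "Subject:" s then i
      else fwdLoopA text (i + 1) (if PySem.Str.isIn "From:" s then i else fromIdx) lineno
  else
    (if fromIdx ≠ 0 then fromIdx else lineno + 1)
termination_by ((text.length : Int) - i).toNat
decreasing_by omega

def findFwdEnd (line : String) (text : List String) (lineno : Int) : Int :=
  fwdLoopA text (lineno + 1) 0 lineno

-- ===== PORT B =====
-- B phase 1: advance end while in range and the line lacks "-- Forwarded by".
def fwdEndScan (text : List String) (e : Int) : Int :=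
  if _h : e < (text.length : Int) then
    match PySem.List.pyGet? text e with
    | none => e   -- Python raises IndexError here; excluded by Pre_
    | some s => if PySem.Str.isIn "-- Forwarded by" s then e else fwdEndScan text (e + 1)
  else e
termination_by ((text.length : Int) - e).toNat
decreasing_by omega

def findFwdEnd_alt (line : String) (text : List String) (lineno : Int) : Int :=
  let e := fwdEndScan text (lineno + 1)
  match (PySem.List.pyRange (lineno + 1) e 1).find?
      (fun i => match PySem.List.pyGet? text i with
                | some s => PySem.Str.isIn "Subject:" s
                | none => false) with
  | some j => j
  | none =>
    let f := (PySem.List.pyRange (lineno + 1) e 1).foldl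
      (fun acc i => match PySem.List.pyGet? text i with
                    | some s => if PySem.Str.isIn "From:" s then i else acc
                    | none => acc) 0
    if f ≠ 0 then f else lineno + 1

-- ===== PRECONDITION & SPEC =====
-- A raises IndexError exactly when lineno+1 < -len(text) (the first negative index
-- is out of range); Pre_ excludes exactly those inputs and nothing else.
def Pre_findFwdEnd (line : String) (text : List String) (lineno : Int) : Prop :=
  -(text.length : Int) ≤ lineno + 1
instance (line : String) (text : List String) (lineno : Int) : Decidable (Pre_findFwdEnd line text lineno) := by unfold Pre_findFwdEnd; infer_instance

def pvWitness_findFwdEnd : String × List String × Int := ("", ["From: a", "Subject: b"], -1)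

def Spec_findFwdEnd (line : String) (text : List String) (lineno : Int) (out : Int) : Prop := out = findFwdEnd_alt line text lineno
instance (line : String) (text : List String) (lineno : Int) (out : Int) : Decidable (Spec_findFwdEnd line text lineno out) := by unfold Spec_findFwdEnd; infer_instance

-- ===== CLAIM (what is proved, stated in full; the proofs are below) =====
def Claim_equal_findFwdEnd : Prop := ∀ (line : String) (text : List String) (lineno : Int), Dom_findFwdEnd line text lineno → Pre_findFwdEnd line text lineno → Spec_findFwdEnd line text lineno (findFwdEnd line text lineno)

-- ===== LEMMAS AND PROOFS =====

lemma le_fwdEndScan (text : List String) (e : Int) : e ≤ fwdEndScan text e := by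
  rw [fwdEndScan]
  split
  · rename_i h
    cases hg : PySem.List.pyGet? text e with
    | none => simp
    | some s =>
      simp only
      split
      · exact le_refl e
      · have := le_fwdEndScan text (e + 1)
        omega
  · exact le_refl e
termination_by ((text.length : Int) - e).toNat
decreasing_by omega

lemma loop_eq (text : List String) (lineno : Int) (i fromIdx : Int)
    (hlo : -(text.length : Int) ≤ i) :
    fwdLoopA text i fromIdx lineno =
      (match (PySem.List.pyRange i (fwdEndScan text i) 1).find?
          (fun j => match PySem.List.pyGet? text j with
                    | some s => PySem.Str.isIn "Subject:" s
                    | none => false) with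
      | some j => j
      | none =>
        let f := (PySem.List.pyRange i (fwdEndScan text i) 1).foldl
          (fun acc j => match PySem.List.pyGet? text j with
                        | some s => if PySem.Str.isIn "From:" s then j else acc
                        | none => acc) fromIdx
        if f ≠ 0 then f else lineno + 1) := by
  by_cases h : i < (text.length : Int)
  · have hin : PySem.Raise.InRange text.length i := by
      unfold PySem.Raise.InRange; omega
    cases hg : PySem.List.pyGet? text i with
    | none =>
      exfalso
      exact ((PySem.List.pyGet?_eq_none_iff text i).mp hg) hin
    | some s =>
      by_cases hm : PySem.Str.isIn "-- Forwarded by" s = true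
      all_goals simp at hm
      · -- marker line: both sides stop here
        have hend : fwdEndScan text i = i := by
          rw [fwdEndScan]; simp [h, hg, hm]
        rw [fwdLoopA]
        simp [h, hg, hm, hend, PySem.List.pyRange_one_eq_nil (le_refl i)]
      · -- no marker: one step, then the induction hypothesis at i+1
        have hend : fwdEndScan text i = fwdEndScan text (i + 1) := by
          rw [fwdEndScan]; simp [h, hg, hm]
        have hlt : i < fwdEndScan text i := by
          have := le_fwdEndScan text (i + 1); omega
        have hcons : PySem.List.pyRange i (fwdEndScan text i) 1
            = i :: PySem.List.pyRange (i + 1) (fwdEndScan text i) 1 :=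
          PySem.List.pyRange_one_cons hlt
        by_cases hs : PySem.Str.isIn "Subject:" s = true
        all_goals simp at hs
        · rw [fwdLoopA]
          simp [h, hg, hm, hs, hcons, List.find?]
        · have ih := loop_eq text lineno (i + 1)
            (if PySem.Str.isIn "From:" s then i else fromIdx) (by omega)
          rw [fwdLoopA]
          simp [h, hg, hm, hs, hcons, ← hend, List.find?]
          simp only [hend]
          simpa using ih
  · -- i ≥ len: loop does not run; end = i; both ranges empty
    have hend : fwdEndScan text i = i := by
      rw [fwdEndScan]; simp [h]
    rw [fwdLoopA]
    simp [h, hend, PySem.List.pyRange_one_eq_nil (le_refl i)]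
termination_by ((text.length : Int) - i).toNat
decreasing_by omega

-- ===== VERDICT (by name: the statement is the Claim_ definition above) =====
theorem findFwdEnd_spec : Claim_equal_findFwdEnd := by
  intro line text lineno _ hpre
  unfold Spec_findFwdEnd findFwdEnd findFwdEnd_alt
  exact loop_eq text lineno (lineno + 1) 0 hpre
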